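-- pv_equiv track=rewrite | github.com/jconnelly/micro-agent-development | Utils/rule_completeness_analyzer.py | _identify_rule_section
-- ===== SOURCE A (Python) =====
-- from typing import Dict, List, Optional, Tuple, Any, Set
--
-- def _identify_rule_section(rule: Dict[str, Any]) -> str:
--     """Identify which section a rule belongs to."""
--     source_lines = rule.get('source_code_lines', '')
--     description = rule.get('business_description', '').lower()
--
--     # Section indicators
--     if any(keyword in description for keyword in ['auto', 'driving', 'vehicle', 'accident', 'dui']):
--         return "AUTO-VALIDATION"
--     elif any(keyword in description for keyword in ['life', 'smoker', 'health', 'beneficiary', 'medical']):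
--         return "LIFE-VALIDATION"
--     elif any(keyword in description for keyword in ['premium', 'calculate', 'surcharge', 'discount']):
--         return "CALCULATE-PREMIUM"
--     elif any(keyword in description for keyword in ['age', 'credit', 'employment', 'income', 'validate']):
--         return "VALIDATE-APPLICATION"
--     else:
--         return "UNKNOWN"
-- ===== SOURCE B (Python) =====
-- # B: single overwrite pass over a flat keyword list in reverse priority order
-- # (lowest-priority section first); the last matching keyword's section wins,
-- # which reproduces A's priority without any short-circuit cascade.
-- _KEYWORDS_REV = [
--     ('age', 'VALIDATE-APPLICATION'), ('credit', 'VALIDATE-APPLICATION'),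
--     ('employment', 'VALIDATE-APPLICATION'), ('income', 'VALIDATE-APPLICATION'),
--     ('validate', 'VALIDATE-APPLICATION'),
--     ('premium', 'CALCULATE-PREMIUM'), ('calculate', 'CALCULATE-PREMIUM'),
--     ('surcharge', 'CALCULATE-PREMIUM'), ('discount', 'CALCULATE-PREMIUM'),
--     ('life', 'LIFE-VALIDATION'), ('smoker', 'LIFE-VALIDATION'),
--     ('health', 'LIFE-VALIDATION'), ('beneficiary', 'LIFE-VALIDATION'),
--     ('medical', 'LIFE-VALIDATION'),
--     ('auto', 'AUTO-VALIDATION'), ('driving', 'AUTO-VALIDATION'),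
--     ('vehicle', 'AUTO-VALIDATION'), ('accident', 'AUTO-VALIDATION'),
--     ('dui', 'AUTO-VALIDATION'),
-- ]
--
-- def _identify_rule_section(rule):
--     source_lines = rule.get('source_code_lines', '')
--     description = rule.get('business_description', '').lower()
--     section = "UNKNOWN"
--     for kw, name in _KEYWORDS_REV:
--         if kw in description:
--             section = name
--     return section
-- ===== Notes on version B (the rewrite author's own statement) =====
-- stated objective: alternative
-- what changed: Replaces the short-circuiting if/elif cascade with a single overwrite pass over one flat keyword list in reverse priority order, so the last matching keyword's section wins instead of the first group test that fires.
import Mathlib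
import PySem

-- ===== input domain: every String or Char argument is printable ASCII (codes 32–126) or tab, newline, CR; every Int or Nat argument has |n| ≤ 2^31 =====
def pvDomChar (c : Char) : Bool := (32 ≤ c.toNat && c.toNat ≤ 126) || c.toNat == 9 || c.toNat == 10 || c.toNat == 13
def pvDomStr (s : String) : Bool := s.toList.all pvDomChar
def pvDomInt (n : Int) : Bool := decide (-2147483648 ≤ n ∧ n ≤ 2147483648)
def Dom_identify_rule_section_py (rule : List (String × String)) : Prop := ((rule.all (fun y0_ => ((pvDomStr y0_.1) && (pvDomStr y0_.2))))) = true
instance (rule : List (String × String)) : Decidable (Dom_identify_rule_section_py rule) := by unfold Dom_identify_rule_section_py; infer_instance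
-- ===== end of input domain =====

-- B replaces A's short-circuiting if/elif cascade with one overwrite pass over a flat keyword list in reverse priority order (last match wins); alternative decomposition, same cost.


-- ===== PORT A =====
def identify_rule_section_py (rule : List (String × String)) : String :=
  let _source_lines := PySem.Dict.getD (PySem.Dict.mk rule) "source_code_lines" ""
  let description := PySem.Str.lower (PySem.Dict.getD (PySem.Dict.mk rule) "business_description" "")
  if ["auto","driving","vehicle","accident","dui"].any (fun k => PySem.Str.isIn k description) then "AUTO-VALIDATION"
  else if ["life","smoker","health","beneficiary","medical"].any (fun k => PySem.Str.isIn k description) then "LIFE-VALIDATION"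
  else if ["premium","calculate","surcharge","discount"].any (fun k => PySem.Str.isIn k description) then "CALCULATE-PREMIUM"
  else if ["age","credit","employment","income","validate"].any (fun k => PySem.Str.isIn k description) then "VALIDATE-APPLICATION"
  else "UNKNOWN"

-- ===== PORT B =====
-- flat keyword list in reverse priority order: lowest-priority section first, so the last match wins
def pvKeywordsRev : List (String × String) :=
  [("age","VALIDATE-APPLICATION"),("credit","VALIDATE-APPLICATION"),
   ("employment","VALIDATE-APPLICATION"),("income","VALIDATE-APPLICATION"),
   ("validate","VALIDATE-APPLICATION"),
   ("premium","CALCULATE-PREMIUM"),("calculate","CALCULATE-PREMIUM"),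
   ("surcharge","CALCULATE-PREMIUM"),("discount","CALCULATE-PREMIUM"),
   ("life","LIFE-VALIDATION"),("smoker","LIFE-VALIDATION"),
   ("health","LIFE-VALIDATION"),("beneficiary","LIFE-VALIDATION"),
   ("medical","LIFE-VALIDATION"),
   ("auto","AUTO-VALIDATION"),("driving","AUTO-VALIDATION"),
   ("vehicle","AUTO-VALIDATION"),("accident","AUTO-VALIDATION"),
   ("dui","AUTO-VALIDATION")]

def identify_rule_section_py_alt (rule : List (String × String)) : String :=
  let _source_lines := PySem.Dict.getD (PySem.Dict.mk rule) "source_code_lines" ""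
  let description := PySem.Str.lower (PySem.Dict.getD (PySem.Dict.mk rule) "business_description" "")
  pvKeywordsRev.foldl (fun sec kv => if PySem.Str.isIn kv.1 description then kv.2 else sec) "UNKNOWN"

-- ===== PRECONDITION & SPEC =====
def Spec_identify_rule_section_py (rule : List (String × String)) (out : String) : Prop := out = identify_rule_section_py_alt rule
instance (rule : List (String × String)) (out : String) : Decidable (Spec_identify_rule_section_py rule out) := by unfold Spec_identify_rule_section_py; infer_instance

-- ===== CLAIM (what is proved, stated in full; the proofs are below) =====
def Claim_equal_identify_rule_section_py : Prop := ∀ (rule : List (String × String)), Dom_identify_rule_section_py rule → Spec_identify_rule_section_py rule (identify_rule_section_py rule)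

-- ===== LEMMAS AND PROOFS =====

-- folding an overwrite pass over the keywords of ONE section (all with the same name)
-- yields that name iff any keyword matches, else leaves the accumulator
theorem pv_group_fold (d : String) (name : String) (kws : List String) (acc : String) :
    List.foldl (fun sec kv => if PySem.Str.isIn kv.1 d then kv.2 else sec) acc
      (kws.map (fun k => (k, name)))
    = if kws.any (fun k => PySem.Str.isIn k d) then name else acc := by
  induction kws generalizing acc with
  | nil => simp
  | cons k rest ih =>
    rw [List.map_cons, List.foldl_cons, ih, List.any_cons]
    by_cases h : PySem.Str.isIn k d
    · simp only [h, Bool.true_or, if_true, ite_self]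
    · simp only [h, Bool.false_or, if_false, Bool.false_eq_true]

-- ===== VERDICT (by name: the statement is the Claim_ definition above) =====
theorem identify_rule_section_py_spec : Claim_equal_identify_rule_section_py := by
  intro rule _
  unfold Spec_identify_rule_section_py identify_rule_section_py identify_rule_section_py_alt
  set d := PySem.Str.lower (PySem.Dict.getD (PySem.Dict.mk rule) "business_description" "") with hd
  have hsplit : pvKeywordsRev =
      (["age","credit","employment","income","validate"].map (fun k => (k, "VALIDATE-APPLICATION")))
      ++ (["premium","calculate","surcharge","discount"].map (fun k => (k, "CALCULATE-PREMIUM")))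
      ++ (["life","smoker","health","beneficiary","medical"].map (fun k => (k, "LIFE-VALIDATION")))
      ++ (["auto","driving","vehicle","accident","dui"].map (fun k => (k, "AUTO-VALIDATION"))) := by
    rfl
  rw [hsplit]
  simp only [List.foldl_append, pv_group_fold]
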